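-- pv_equiv track=rewrite | github.com/xvalier/basicLib | testing/csvUtilities.py | cleanCSV
-- ===== SOURCE A (Python) =====
-- def cleanCSV(data):
--     cleanedData = []
--     for row in data:
--         processedEntry = []
--         #Normalize quotation, commas. Remove endlines and backslashes
--         for entry in row:
--             entry = entry.replace('"','')
--             entry = entry.replace(',',';')
--             entry = entry.replace('\r\n', ' ... ')
--             entry = entry.replace('\n',' ... ')
--             entry = entry.replace("\\",'/')
--             processedEntry.append(entry)
--         cleanedData.append(processedEntry)
--     return cleanedData
-- ===== SOURCE B (Python) =====
-- def cleanCSV(data):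
--     # One pass per cell: drop quotes, then a single left-to-right scan rewrites
--     # commas, newlines (with \r\n as one unit) and backslashes.
--     def clean(entry):
--         s = [c for c in entry if c != '"']
--         out = []
--         i = 0
--         n = len(s)
--         while i < n:
--             c = s[i]
--             if c == '\r' and i + 1 < n and s[i + 1] == '\n':
--                 out.append(' ... ')
--                 i += 2
--             elif c == '\n':
--                 out.append(' ... ')
--                 i += 1
--             elif c == ',':
--                 out.append(';')
--                 i += 1
--             elif c == '\\':
--                 out.append('/')
--                 i += 1
--             else:
--                 out.append(c)
--                 i += 1
--         return ''.join(out)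
--     return [[clean(e) for e in row] for row in data]
-- ===== Notes on version B (the rewrite author's own statement) =====
-- stated objective: alternative
-- what changed: B replaces A's five sequential full-string str.replace passes per cell by a quote filter plus one single left-to-right scan that rewrites ',', '\r\n', '\n' and '\\' in one pass over each cell.
import Mathlib
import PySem

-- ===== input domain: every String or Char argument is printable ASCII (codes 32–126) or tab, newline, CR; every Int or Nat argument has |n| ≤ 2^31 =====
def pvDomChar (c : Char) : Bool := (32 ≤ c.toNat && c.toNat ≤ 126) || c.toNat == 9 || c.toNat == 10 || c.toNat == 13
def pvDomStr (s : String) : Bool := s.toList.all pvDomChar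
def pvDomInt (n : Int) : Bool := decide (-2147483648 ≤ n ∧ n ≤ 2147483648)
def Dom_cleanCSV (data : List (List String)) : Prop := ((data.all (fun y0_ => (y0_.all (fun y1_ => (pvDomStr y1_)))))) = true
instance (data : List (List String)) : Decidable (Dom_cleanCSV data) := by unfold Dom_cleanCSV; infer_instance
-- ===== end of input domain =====

-- B replaces A's five sequential str.replace scans per cell by one quote-filter plus a single
-- left-to-right scan that rewrites ',', '\r\n', '\n' and '\\' in one pass (objective: alternative single-pass structure).

-- ===== PORT A =====
def cleanCSV (data : List (List String)) : List (List String) :=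
  data.foldl (fun cleanedData row =>
    cleanedData ++ [row.foldl (fun processedEntry entry =>
      let e1 := PySem.Str.replace entry "\"" ""
      let e2 := PySem.Str.replace e1 "," ";"
      let e3 := PySem.Str.replace e2 "\r\n" " ... "
      let e4 := PySem.Str.replace e3 "\n" " ... "
      let e5 := PySem.Str.replace e4 "\\" "/"
      processedEntry ++ [e5]) []]) []

-- ===== PORT B =====
-- the while-loop scan of Source B, as the obvious structural recursion over the char list
def cleanEntryChars : List Char → List Char
  | [] => []
  | '\r' :: '\n' :: t => ' ' :: '.' :: '.' :: '.' :: ' ' :: cleanEntryChars t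
  | '\n' :: t => ' ' :: '.' :: '.' :: '.' :: ' ' :: cleanEntryChars t
  | ',' :: t => ';' :: cleanEntryChars t
  | '\\' :: t => '/' :: cleanEntryChars t
  | c :: t => c :: cleanEntryChars t

def cleanCSV_alt (data : List (List String)) : List (List String) :=
  data.map (fun row => row.map (fun e =>
    String.ofList (cleanEntryChars (e.toList.filter (· != '"')))))

-- ===== PRECONDITION & SPEC =====
def Spec_cleanCSV (data : List (List String)) (out : List (List String)) : Prop := out = cleanCSV_alt data
instance (data : List (List String)) (out : List (List String)) : Decidable (Spec_cleanCSV data out) := by unfold Spec_cleanCSV; infer_instance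

-- ===== CLAIM (what is proved, stated in full; the proofs are below) =====
def Claim_equal_cleanCSV : Prop := ∀ (data : List (List String)), Dom_cleanCSV data → Spec_cleanCSV data (cleanCSV data)

-- ===== LEMMAS AND PROOFS =====

-- natural recursion equivalent to PySem.Chars.replace.go for a nonempty pattern
def rep (o : Char) (ot new : List Char) : List Char → List Char
  | [] => []
  | c :: t =>
    if (o :: ot).isPrefixOf (c :: t) then new ++ rep o ot new (t.drop ot.length)
    else c :: rep o ot new t
termination_by l => l.length
decreasing_by
  all_goals simp

lemma rep_nil (o : Char) (ot new : List Char) : rep o ot new [] = [] := by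
  rw [rep.eq_def]

lemma rep_cons (o : Char) (ot new : List Char) (c : Char) (t : List Char) :
    rep o ot new (c :: t) =
      if (o :: ot).isPrefixOf (c :: t) then new ++ rep o ot new (t.drop ot.length)
      else c :: rep o ot new t := by
  rw [rep.eq_def]

lemma rep_go_eq (o : Char) (ot new : List Char) :
    ∀ (fuel : Nat) (l acc : List Char), l.length ≤ fuel →
      PySem.Chars.replace.go (o :: ot) new fuel l acc = acc.reverse ++ rep o ot new l := by
  intro fuel
  induction fuel with
  | zero =>
    intro l acc h
    have : l = [] := by cases l <;> simp_all
    subst this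
    simp [PySem.Chars.replace.go, rep_nil]
  | succ n ih =>
    intro l acc h
    cases l with
    | nil => simp [PySem.Chars.replace.go, rep_nil]
    | cons c t =>
      rw [PySem.Chars.replace.go]
      by_cases hp : (o :: ot).isPrefixOf (c :: t)
      · have hlen : (t.drop ot.length).length ≤ n := by
          simp at h ⊢; omega
        simp only [hp, if_true]
        rw [show (c :: t).drop (o :: ot).length = t.drop ot.length by simp]
        rw [ih _ _ hlen, rep_cons]
        simp [hp]
      · have hlen : t.length ≤ n := by simp at h; omega
        rw [if_neg hp, ih _ _ hlen, rep_cons]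
        simp [hp]

lemma replace_eq_rep (o : Char) (ot new s : List Char) :
    PySem.Chars.replace s (o :: ot) new = rep o ot new s := by
  rw [PySem.Chars.replace]
  simp [rep_go_eq o ot new s.length s [] (le_refl _)]

-- single-character patterns act characterwise
lemma rep_single (a : Char) (new : List Char) (l : List Char) :
    rep a [] new l = l.flatMap (fun c => if c = a then new else [c]) := by
  induction l with
  | nil => simp [rep_nil]
  | cons c t ih =>
    rw [rep_cons]
    by_cases h : c = a
    · subst h; simp [ih, List.isPrefixOf]
    · have : ¬ ([a].isPrefixOf (c :: t)) := by
        simp [List.isPrefixOf]; exact fun he => (h he.symm).elim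
      simp [this, ih, h]

lemma rep_single_cons (a : Char) (new : List Char) (c : Char) (t : List Char) :
    rep a [] new (c :: t) = (if c = a then new else [c]) ++ rep a [] new t := by
  simp only [rep_single, List.flatMap_cons]

lemma rep_quote_filter (l : List Char) :
    rep '"' [] [] l = l.filter (· != '"') := by
  rw [rep_single]
  induction l with
  | nil => simp
  | cons c t ih =>
    by_cases h : c = '"' <;> simp [h, ih]

-- the two-character pattern '\r\n'
lemma rep_rn_hit (new t : List Char) :
    rep '\r' ['\n'] new ('\r' :: '\n' :: t) = new ++ rep '\r' ['\n'] new t := by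
  rw [rep_cons, if_pos (by simp [List.isPrefixOf])]
  simp

lemma rep_rn_cons_ne (new : List Char) (c : Char) (t : List Char) (h : c ≠ '\r') :
    rep '\r' ['\n'] new (c :: t) = c :: rep '\r' ['\n'] new t := by
  rw [rep_cons, if_neg]
  intro hp
  cases t with
  | nil => simp [List.isPrefixOf] at hp
  | cons d t' => simp [List.isPrefixOf] at hp; exact h hp.1.symm

lemma rep_rn_r_cons (new t : List Char) (h : t.head? ≠ some '\n') :
    rep '\r' ['\n'] new ('\r' :: t) = '\r' :: rep '\r' ['\n'] new t := by
  rw [rep_cons, if_neg]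
  intro hp
  cases t with
  | nil => simp [List.isPrefixOf] at hp
  | cons d t' =>
    simp [List.isPrefixOf] at hp
    exact h (by simp [← hp])

lemma rep_rn_lf (new t : List Char) :
    rep '\r' ['\n'] new ('\n' :: t) = '\n' :: rep '\r' ['\n'] new t :=
  rep_rn_cons_ne new '\n' t (by decide)

lemma rep_rn_semi (new t : List Char) :
    rep '\r' ['\n'] new (';' :: t) = ';' :: rep '\r' ['\n'] new t :=
  rep_rn_cons_ne new ';' t (by decide)

lemma rep_rn_bs (new t : List Char) :
    rep '\r' ['\n'] new ('\\' :: t) = '\\' :: rep '\r' ['\n'] new t :=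
  rep_rn_cons_ne new '\\' t (by decide)

lemma head_rep_comma (t : List Char) :
    (rep ',' [] [';'] t).head? = some '\n' ↔ t.head? = some '\n' := by
  cases t with
  | nil => simp [rep_nil]
  | cons d t' =>
    rw [rep_single_cons]
    by_cases h : d = ',' <;> simp [h]

-- the A-chain on a list equals B's single scan
lemma chain_eq (g : List Char) :
    rep '\\' [] ['/'] (rep '\n' [] [' ', '.', '.', '.', ' ']
      (rep '\r' ['\n'] [' ', '.', '.', '.', ' '] (rep ',' [] [';'] g)))
    = cleanEntryChars g := by
  fun_induction cleanEntryChars g with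
  | case1 => simp [rep_nil]
  | case2 t ih =>
    simp [rep_single_cons, rep_rn_hit, ih]
  | case3 t ih =>
    simp [rep_single_cons, rep_rn_lf, ih]
  | case4 t ih =>
    simp [rep_single_cons, rep_rn_semi, ih]
  | case5 t ih =>
    simp [rep_single_cons, rep_rn_bs, ih]
  | case6 c t h1 h2 h3 h4 ih =>
    rw [rep_single_cons, if_neg (fun h => h3 h), List.singleton_append]
    by_cases hr : c = '\r'
    · subst hr
      have ht : (rep ',' [] [';'] t).head? ≠ some '\n' := by
        intro hh
        cases t with
        | nil => simp [rep_nil] at hh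
        | cons d t' =>
          have hd : d = '\n' := by
            have := (head_rep_comma (d :: t')).mp hh
            simpa using this
          exact h1 t' rfl (by rw [hd])
      rw [rep_rn_r_cons _ _ ht]
      rw [rep_single_cons, if_neg (by decide : ¬ (('\r' : Char) = '\n')), List.singleton_append]
      rw [rep_single_cons, if_neg (by decide : ¬ (('\r' : Char) = '\\')), List.singleton_append, ih]
    · rw [rep_rn_cons_ne _ _ _ hr]
      rw [rep_single_cons, if_neg (fun h => h2 h), List.singleton_append]
      rw [rep_single_cons, if_neg (fun h => h4 h), List.singleton_append, ih]

-- one cell: A's five replaces = B's filter + scan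
lemma entry_eq (e : String) :
    PySem.Str.replace (PySem.Str.replace (PySem.Str.replace (PySem.Str.replace
      (PySem.Str.replace e "\"" "") "," ";") "\r\n" " ... ") "\n" " ... ") "\\" "/"
    = String.ofList (cleanEntryChars (e.toList.filter (· != '"'))) := by
  apply String.toList_inj.mp
  simp only [PySem.Str.toList_replace, String.toList_ofList]
  rw [show ("\"" : String).toList = ['"'] from rfl,
      show ("" : String).toList = [] from rfl,
      show ("," : String).toList = [','] from rfl,
      show (";" : String).toList = [';'] from rfl,
      show ("\r\n" : String).toList = ['\r', '\n'] from rfl,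
      show (" ... " : String).toList = [' ', '.', '.', '.', ' '] from rfl,
      show ("\n" : String).toList = ['\n'] from rfl,
      show ("\\" : String).toList = ['\\'] from rfl,
      show ("/" : String).toList = ['/'] from rfl]
  rw [replace_eq_rep, replace_eq_rep, replace_eq_rep, replace_eq_rep, replace_eq_rep]
  rw [rep_quote_filter, chain_eq]

theorem cleanCSV_spec_aux (data : List (List String)) :
    cleanCSV data = cleanCSV_alt data := by
  unfold cleanCSV cleanCSV_alt
  rw [PySem.List.foldl_append_singleton_eq_map]
  apply List.map_congr_left
  intro row _
  rw [PySem.List.foldl_append_singleton_eq_map]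
  apply List.map_congr_left
  intro e _
  exact entry_eq e

-- ===== VERDICT (by name: the statement is the Claim_ definition above) =====
theorem cleanCSV_spec : Claim_equal_cleanCSV := by
  intro data _
  unfold Spec_cleanCSV
  exact cleanCSV_spec_aux data
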